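-- pv_equiv track=rewrite | github.com/Aqlanlab/CF-MARL-SMV2D | core/data_preprocessing.py | _map_root_cause_from_defect_code
-- ===== SOURCE A (Python) =====
-- from typing import Dict, List, Optional, Tuple
--
-- def _map_root_cause_from_defect_code(defect_code_int: Optional[int]) -> str:
--     _mapping_ranges = [
--         (1, 26, "Internal Failure"),
--         (27, 39, "Damage"),
--         (40, 77, "Poor Connections"),
--         (78, 102, "Other")
--     ]
--
--     if defect_code_int is None:
--         return "Unknown"
--
--     for start, end, cause in _mapping_ranges:
--         if start <= defect_code_int <= end:
--             return cause
--     return "Unknown"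
-- ===== SOURCE B (Python) =====
-- def _map_root_cause_from_defect_code(defect_code_int):
--     if defect_code_int is None or defect_code_int < 1 or defect_code_int > 102:
--         return "Unknown"
--     bounds = [26, 39, 77, 102]
--     causes = ["Internal Failure", "Damage", "Poor Connections", "Other"]
--     lo, hi = 0, 4
--     while lo < hi:
--         mid = (lo + hi) // 2
--         if bounds[mid] < defect_code_int:
--             lo = mid + 1
--         else:
--             hi = mid
--     return causes[lo]
-- ===== Notes on version B (the rewrite author's own statement) =====
-- stated objective: alternative
-- what changed: Replaces the linear scan over (start,end,cause) range triples with a guard for out-of-range/None plus a hand-written binary search (bisect_left) over the sorted upper bounds [26,39,77,102] indexing a parallel causes list.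
import Mathlib
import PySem

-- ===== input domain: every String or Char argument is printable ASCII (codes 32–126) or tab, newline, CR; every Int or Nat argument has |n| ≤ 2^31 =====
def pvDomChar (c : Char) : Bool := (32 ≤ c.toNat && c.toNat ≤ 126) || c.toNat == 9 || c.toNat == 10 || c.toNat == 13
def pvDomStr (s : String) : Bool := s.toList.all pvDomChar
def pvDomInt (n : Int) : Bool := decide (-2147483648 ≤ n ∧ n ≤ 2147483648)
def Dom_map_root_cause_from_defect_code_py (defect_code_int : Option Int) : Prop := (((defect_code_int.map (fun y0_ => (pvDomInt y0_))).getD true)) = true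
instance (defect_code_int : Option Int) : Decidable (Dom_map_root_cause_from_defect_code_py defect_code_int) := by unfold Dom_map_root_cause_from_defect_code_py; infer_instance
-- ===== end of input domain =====

-- B replaces A's linear scan over (start, end, cause) range triples by a range guard plus a
-- hand-written binary search over the sorted upper bounds indexing a parallel causes list.

-- ===== PORT A =====
-- the for-loop with early return over the mapping ranges
def pvALoop (n : Int) : List (Int × Int × String) → String
  | [] => "Unknown"
  | (s, e, c) :: rest => if s ≤ n ∧ n ≤ e then c else pvALoop n rest

def map_root_cause_from_defect_code_py (defect_code_int : Option Int) : String :=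
  let mappingRanges : List (Int × Int × String) :=
    [(1, 26, "Internal Failure"), (27, 39, "Damage"), (40, 77, "Poor Connections"), (78, 102, "Other")]
  match defect_code_int with
  | none => "Unknown"
  | some n => pvALoop n mappingRanges

-- ===== PORT B =====
-- the while-loop binary search (bisect_left); bounds[mid] is always in range (lo ≤ mid < hi ≤ |bounds|), so getD's default is never used
def pvBisect (bounds : List Int) (x : Int) (lo hi : Nat) : Nat :=
  if h : lo < hi then
    let mid := (lo + hi) / 2
    if bounds.getD mid 0 < x then pvBisect bounds x (mid + 1) hi else pvBisect bounds x lo mid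
  else lo
termination_by hi - lo
decreasing_by all_goals omega

def map_root_cause_from_defect_code_py_alt (defect_code_int : Option Int) : String :=
  match defect_code_int with
  | none => "Unknown"
  | some n =>
    if n < 1 ∨ 102 < n then "Unknown"
    else
      let bounds : List Int := [26, 39, 77, 102]
      let causes : List String := ["Internal Failure", "Damage", "Poor Connections", "Other"]
      causes.getD (pvBisect bounds n 0 4) "Unknown"

-- ===== PRECONDITION & SPEC =====
def Spec_map_root_cause_from_defect_code_py (defect_code_int : Option Int) (out : String) : Prop := out = map_root_cause_from_defect_code_py_alt defect_code_int
instance (defect_code_int : Option Int) (out : String) : Decidable (Spec_map_root_cause_from_defect_code_py defect_code_int out) := by unfold Spec_map_root_cause_from_defect_code_py; infer_instance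

-- ===== CLAIM (what is proved, stated in full; the proofs are below) =====
def Claim_equal_map_root_cause_from_defect_code_py : Prop := ∀ (defect_code_int : Option Int), Dom_map_root_cause_from_defect_code_py defect_code_int → Spec_map_root_cause_from_defect_code_py defect_code_int (map_root_cause_from_defect_code_py defect_code_int)

-- ===== LEMMAS AND PROOFS =====
lemma pvBisect_val (n : Int) (hle : n ≤ 102) :
    pvBisect [26, 39, 77, 102] n 0 4 =
      if n ≤ 26 then 0 else if n ≤ 39 then 1 else if n ≤ 77 then 2 else 3 := by
  rw [pvBisect]; norm_num [List.getD]
  by_cases h77 : (77 : Int) < n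
  · rw [if_pos h77, pvBisect]; norm_num [List.getD]
    rw [if_neg (by omega), pvBisect]; norm_num
    split_ifs <;> omega
  · rw [if_neg h77, pvBisect]; norm_num [List.getD]
    by_cases h39 : (39 : Int) < n
    · rw [if_pos h39, pvBisect]; norm_num
      split_ifs <;> omega
    · rw [if_neg h39, pvBisect]; norm_num [List.getD]
      by_cases h26 : (26 : Int) < n
      · rw [if_pos h26, pvBisect]; norm_num; split_ifs <;> omega
      · rw [if_neg h26, pvBisect]; norm_num; split_ifs <;> omega

-- ===== VERDICT (by name: the statement is the Claim_ definition above) =====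
theorem map_root_cause_from_defect_code_py_spec : Claim_equal_map_root_cause_from_defect_code_py := by
  intro d _
  unfold Spec_map_root_cause_from_defect_code_py
  cases d with
  | none => rfl
  | some n =>
    simp only [map_root_cause_from_defect_code_py, map_root_cause_from_defect_code_py_alt, pvALoop]
    by_cases hout : n < 1 ∨ 102 < n
    · rw [if_pos hout]
      rcases hout with h | h <;> (repeat rw [if_neg (by omega)])
    · rw [if_neg hout, pvBisect_val n (by omega)]
      split_ifs <;> simp_all [List.getD] <;> omega
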